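-- pv_equiv track=rewrite | github.com/bakpaul/TestScenes | Slicer/LogoMesh/testing.py | IsMeshTriangulated
-- ===== SOURCE A (Python) =====
-- def IsMeshTriangulated(mesh):
--     edges = {}
--     for tri in mesh:
--         for i in range(3):
--             edge = [tri[i], tri[(i+1)%3]]
--             if( edge[0] not in edges):
--                 edges[edge[0]] = {}
--
--             if( edge[1] in edges[edge[0]]):
--                 return False
--             else:
--                 edges[edge[0]][edge[1]] = 1
--
--     return True
-- ===== SOURCE B (Python) =====
-- def IsMeshTriangulated(mesh):
--     edges = sorted((tri[i], tri[(i + 1) % 3]) for tri in mesh for i in range(3))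
--     return all(a != b for a, b in zip(edges, edges[1:]))
-- ===== Notes on version B (the rewrite author's own statement) =====
-- stated objective: alternative
-- what changed: A detects a repeated directed edge with an early-exit scan that maintains a nested dict-of-dicts of edges seen so far; B uses no hashing at all: it sorts the full directed-edge list and returns whether every adjacent pair of the sorted list is distinct.
-- outside the precondition, e.g. on IsMeshTriangulated([[1, 2, 3], [1, 2, 3], [0]]): A returns False, B raises IndexError
import Mathlib
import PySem

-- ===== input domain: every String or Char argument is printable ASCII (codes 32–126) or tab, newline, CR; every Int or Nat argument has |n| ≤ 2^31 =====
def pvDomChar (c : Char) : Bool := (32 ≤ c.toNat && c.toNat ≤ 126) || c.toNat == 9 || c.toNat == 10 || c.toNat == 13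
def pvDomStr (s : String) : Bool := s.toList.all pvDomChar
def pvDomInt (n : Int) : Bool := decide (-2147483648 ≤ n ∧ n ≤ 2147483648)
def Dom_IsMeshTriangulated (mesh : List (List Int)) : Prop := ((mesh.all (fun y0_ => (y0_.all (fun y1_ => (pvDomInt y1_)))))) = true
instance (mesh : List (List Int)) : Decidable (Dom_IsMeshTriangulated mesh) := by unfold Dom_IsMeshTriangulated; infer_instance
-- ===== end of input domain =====

-- B replaces A's early-exit nested dict-of-dicts edge scan by a hash-free algorithm:
-- sort the full directed-edge list, then check every adjacent pair of the sorted list is distinct.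


-- ===== PORT A =====
-- state: none = exception raised; .error () = 'return False' taken; .ok edges = still looping
def aStep (tri : List Int)
    (st : Option (Except Unit (PySem.Dict Int (PySem.Dict Int Int)))) (i : Int) :
    Option (Except Unit (PySem.Dict Int (PySem.Dict Int Int))) :=
  match st with
  | none => none
  | some (.error u) => some (.error u)
  | some (.ok edges) =>
    match PySem.List.pyGet? tri i, PySem.List.pyGet? tri (PySem.Int.mod (i + 1) 3) with
    | some e0, some e1 =>
      -- if edge[0] not in edges: edges[edge[0]] = {}
      let edges1 := if edges.contains e0 then edges else edges.insert e0 PySem.Dict.empty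
      match edges1.get? e0 with
      | some inner =>
        -- if edge[1] in edges[edge[0]]: return False  else edges[edge[0]][edge[1]] = 1
        if inner.contains e1 then some (.error ())
        else some (.ok (edges1.insert e0 (inner.insert e1 1)))
      | none => none
    | _, _ => none

def aTri (st : Option (Except Unit (PySem.Dict Int (PySem.Dict Int Int)))) (tri : List Int) :
    Option (Except Unit (PySem.Dict Int (PySem.Dict Int Int))) :=
  (PySem.List.pyRange 0 3 1).foldl (aStep tri) st

def IsMeshTriangulated (mesh : List (List Int)) : Bool :=
  match mesh.foldl aTri (some (.ok PySem.Dict.empty)) with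
  | some (.error _) => false
  | _ => true

-- ===== PORT B =====
-- the generator (tri[i], tri[(i+1)%3]) for tri in mesh for i in range(3)
def bStep (tri : List Int) (acc : Option (List (Int × Int))) (i : Int) :
    Option (List (Int × Int)) :=
  match acc with
  | none => none
  | some es =>
    match PySem.List.pyGet? tri i, PySem.List.pyGet? tri (PySem.Int.mod (i + 1) 3) with
    | some a, some b => some (es ++ [(a, b)])
    | _, _ => none

def bTri (acc : Option (List (Int × Int))) (tri : List Int) : Option (List (Int × Int)) :=
  (PySem.List.pyRange 0 3 1).foldl (bStep tri) acc

def bGen (mesh : List (List Int)) : Option (List (Int × Int)) :=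
  mesh.foldl bTri (some [])

def IsMeshTriangulated_alt (mesh : List (List Int)) : Bool :=
  match bGen mesh with
  | some raw =>
    -- edges = sorted(...)  (Python sorts the (int, int) tuples lexicographically)
    let edges := PySem.List.sorted2 raw Prod.fst Prod.snd
    -- all(a != b for a, b in zip(edges, edges[1:]))
    (edges.zip (PySem.List.slice edges (some 1) none)).all (fun p => !(p.1 == p.2))
  | none => true

-- ===== PRECONDITION & SPEC =====
-- Pre_ requires every triangle to have at least 3 vertices: on meshes containing a shorter
-- triangle A raises IndexError, or (when a duplicate edge occurs before the short triangle)
-- returns False only thanks to its early exit, while B's comprehension raises there.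
def Pre_IsMeshTriangulated (mesh : List (List Int)) : Prop :=
  ∀ tri ∈ mesh, 3 ≤ tri.length
instance (mesh : List (List Int)) : Decidable (Pre_IsMeshTriangulated mesh) := by
  unfold Pre_IsMeshTriangulated; infer_instance

def pvWitness_IsMeshTriangulated : List (List Int) := [[0, 1, 2], [2, 1, 3]]

def Spec_IsMeshTriangulated (mesh : List (List Int)) (out : Bool) : Prop :=
  out = IsMeshTriangulated_alt mesh
instance (mesh : List (List Int)) (out : Bool) : Decidable (Spec_IsMeshTriangulated mesh out) := by
  unfold Spec_IsMeshTriangulated; infer_instance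

-- ===== CLAIM (what is proved, stated in full; the proofs are below) =====
def Claim_equal_IsMeshTriangulated : Prop :=
  ∀ (mesh : List (List Int)), Dom_IsMeshTriangulated mesh → Pre_IsMeshTriangulated mesh →
    Spec_IsMeshTriangulated mesh (IsMeshTriangulated mesh)

-- ===== LEMMAS AND PROOFS =====

-- the directed edges of one (≥3-vertex) triangle, and of a whole mesh
def triE (a b c : Int) : List (Int × Int) := [(a, b), (b, c), (c, a)]

def flatE (mesh : List (List Int)) : List (Int × Int) :=
  mesh.flatMap (fun tri =>
    match tri with
    | a :: b :: c :: _ => triE a b c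
    | _ => [])

-- one edge step of A, at the level of edge values
def eStep (st : Option (Except Unit (PySem.Dict Int (PySem.Dict Int Int))))
    (e : Int × Int) : Option (Except Unit (PySem.Dict Int (PySem.Dict Int Int))) :=
  match st with
  | none => none
  | some (.error u) => some (.error u)
  | some (.ok edges) =>
    let edges1 := if edges.contains e.1 then edges else edges.insert e.1 PySem.Dict.empty
    match edges1.get? e.1 with
    | some inner =>
      if inner.contains e.2 then some (.error ())
      else some (.ok (edges1.insert e.1 (inner.insert e.2 1)))
    | none => none

-- the nested dict represents exactly the set of edges seen so far
def ERep (d : PySem.Dict Int (PySem.Dict Int Int)) (seen : List (Int × Int)) : Prop :=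
  ∀ a b, (∃ inner, d.get? a = some inner ∧ inner.contains b = true) ↔ (a, b) ∈ seen

theorem aTri_cons (st : Option (Except Unit (PySem.Dict Int (PySem.Dict Int Int))))
    (a b c : Int) (r : List Int) :
    aTri st (a :: b :: c :: r) = (triE a b c).foldl eStep st := by
  have h3 : PySem.List.pyRange 0 3 1 = [0, 1, 2] := by decide
  rcases st with _ | st
  · simp [aTri, h3, aStep, eStep, triE, List.foldl]
  · rcases st with u | d
    · simp [aTri, h3, aStep, eStep, triE, List.foldl]
    · simp only [aTri, h3, triE, List.foldl]
      have g0 : PySem.List.pyGet? (a :: b :: c :: r) 0 = some a :=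
        PySem.List.pyGet?_ofNat (a :: b :: c :: r) 0 (by simp)
      have g1 : PySem.List.pyGet? (a :: b :: c :: r) 1 = some b := by
        simpa using PySem.List.pyGet?_ofNat (a :: b :: c :: r) 1 (by simp)
      have g2 : PySem.List.pyGet? (a :: b :: c :: r) 2 = some c := by
        simpa using PySem.List.pyGet?_ofNat (a :: b :: c :: r) 2 (by simp)
      simp [aStep, eStep, g0, g1, g2]

theorem eStep_error (es : List (Int × Int)) (u : Unit) :
    es.foldl eStep (some (.error u)) = some (.error u) := by
  induction es with
  | nil => rfl
  | cons e r ih => simpa [List.foldl, eStep] using ih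

-- the key invariant: folding eStep over es from a dict representing `seen` (nodup)
-- errors iff seen ++ es has a duplicate, and otherwise yields a dict representing seen ++ es
theorem eFold_spec (es : List (Int × Int)) :
    ∀ (d : PySem.Dict Int (PySem.Dict Int Int)) (seen : List (Int × Int)),
      ERep d seen → seen.Nodup →
      (es.foldl eStep (some (.ok d)) = some (.error ()) ∧ ¬ (seen ++ es).Nodup) ∨
      (∃ d', es.foldl eStep (some (.ok d)) = some (.ok d') ∧ (seen ++ es).Nodup ∧
        ERep d' (seen ++ es)) := by
  induction es with
  | nil => intro d seen hrep hnd; right; exact ⟨d, rfl, by simpa using hnd, by simpa using hrep⟩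
  | cons e r ih =>
    intro d seen hrep hnd
    obtain ⟨ea, eb⟩ := e
    -- compute the inner dict looked up by eStep
    have hinner : ∃ inner,
        ((if d.contains ea then d else d.insert ea PySem.Dict.empty).get? ea = some inner ∧
          ∀ y, inner.contains y = true ↔ (ea, y) ∈ seen) := by
      by_cases hc : d.contains ea = true
      · rw [PySem.Dict.contains_eq_isSome_get?] at hc
        obtain ⟨inn, hinn⟩ := Option.isSome_iff_exists.mp hc
        refine ⟨inn, by simp [PySem.Dict.contains_eq_isSome_get?, hinn], fun y => ?_⟩
        constructor
        · intro hy; exact (hrep ea y).mp ⟨inn, hinn, hy⟩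
        · intro hy; obtain ⟨inn', hinn', hy'⟩ := (hrep ea y).mpr hy
          rw [hinn] at hinn'; cases hinn'; exact hy'
      · have hg : d.get? ea = none := by
          rw [PySem.Dict.contains_eq_isSome_get?] at hc
          cases h : d.get? ea with
          | none => rfl
          | some v => rw [h] at hc; simp at hc
        refine ⟨PySem.Dict.empty, ?_, fun y => ?_⟩
        · simp [hc, PySem.Dict.get?_insert_self]
        · constructor
          · intro hy; simp [PySem.Dict.empty, PySem.Dict.contains] at hy
          · intro hy; obtain ⟨inn', hinn', _⟩ := (hrep ea y).mpr hy
            rw [hg] at hinn'; cases hinn'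
    obtain ⟨inner, hget, hmem⟩ := hinner
    by_cases hdup : (ea, eb) ∈ seen
    · left
      have hb : inner.contains eb = true := (hmem eb).mpr hdup
      constructor
      · simp only [List.foldl, eStep, hget, hb, if_true]
        exact eStep_error r ()
      · intro hnd'
        exact List.disjoint_of_nodup_append hnd' hdup (by simp)
    · have hb : inner.contains eb = false := by
        cases h : inner.contains eb with
        | false => rfl
        | true => exact absurd ((hmem eb).mp h) hdup
      have hstep : eStep (some (.ok d)) (ea, eb) =
          some (.ok ((if d.contains ea then d else d.insert ea PySem.Dict.empty).insert ea
            (inner.insert eb 1))) := by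
        simp only [eStep, hget, hb]; rfl
      set d2 := (if d.contains ea then d else d.insert ea PySem.Dict.empty).insert ea
        (inner.insert eb 1) with hd2
      have hrep2 : ERep d2 (seen ++ [(ea, eb)]) := by
        intro x y
        by_cases hx : x = ea
        · subst hx
          have : d2.get? x = some (inner.insert eb 1) := PySem.Dict.get?_insert_self _ _ _
          constructor
          · intro ⟨inn', hinn', hy⟩
            rw [this] at hinn'; cases hinn'
            rw [PySem.Dict.contains_eq_isSome_get?] at hy
            by_cases hyb : y = eb
            · subst hyb; simp
            · have : (inner.insert eb 1).get? y = inner.get? y :=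
                PySem.Dict.get?_insert_of_ne _ _ hyb
              rw [this, ← PySem.Dict.contains_eq_isSome_get?] at hy
              exact List.mem_append_left _ ((hmem y).mp hy)
          · intro hy
            refine ⟨inner.insert eb 1, this, ?_⟩
            rw [PySem.Dict.contains_eq_isSome_get?]
            rcases List.mem_append.mp hy with hy | hy
            · have := (hmem y).mpr hy
              rw [PySem.Dict.contains_eq_isSome_get?] at this
              by_cases hyb : y = eb
              · subst hyb; simp [PySem.Dict.get?_insert_self]
              · rw [PySem.Dict.get?_insert_of_ne _ _ hyb]; exact this
            · simp at hy; rw [hy]; simp [PySem.Dict.get?_insert_self]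
        · have h1 : d2.get? x = d.get? x := by
            rw [hd2, PySem.Dict.get?_insert_of_ne _ _ hx]
            by_cases hc : d.contains ea = true
            · simp [hc]
            · simp [hc, PySem.Dict.get?_insert_of_ne _ _ hx]
          constructor
          · intro ⟨inn', hinn', hy⟩
            rw [h1] at hinn'
            exact List.mem_append_left _ ((hrep x y).mp ⟨inn', hinn', hy⟩)
          · intro hy
            rcases List.mem_append.mp hy with hy | hy
            · obtain ⟨inn', hinn', hy'⟩ := (hrep x y).mpr hy
              exact ⟨inn', by rw [h1]; exact hinn', hy'⟩
            · simp at hy; exact absurd hy.1 hx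
      have hnd2 : (seen ++ [(ea, eb)]).Nodup := by
        refine List.Nodup.append hnd (List.nodup_singleton _) ?_
        intro x hx hx'; simp at hx'; subst hx'; exact hdup hx
      have := ih d2 (seen ++ [(ea, eb)]) hrep2 hnd2
      simp only [List.foldl, hstep]
      rw [List.append_assoc] at this
      simpa using this

-- flatten A's two-level fold into an edge fold (under Pre_)
theorem aFold_eq (mesh : List (List Int)) (hpre : Pre_IsMeshTriangulated mesh) :
    ∀ st, mesh.foldl aTri st = (flatE mesh).foldl eStep st := by
  induction mesh with
  | nil => intro st; rfl
  | cons tri rest ih =>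
    intro st
    have htri := hpre tri (by simp)
    match tri, htri with
    | a :: b :: c :: r, _ =>
      have hrest : Pre_IsMeshTriangulated rest := fun t ht => hpre t (by simp [ht])
      simp only [List.foldl, flatE, List.flatMap_cons, List.foldl_append]
      rw [aTri_cons, ih hrest]
      rfl

-- flatten B's generator fold (under Pre_)
theorem bTri_cons (es : List (Int × Int)) (a b c : Int) (r : List Int) :
    bTri (some es) (a :: b :: c :: r) = some (es ++ triE a b c) := by
  have h3 : PySem.List.pyRange 0 3 1 = [0, 1, 2] := by decide
  have g0 : PySem.List.pyGet? (a :: b :: c :: r) 0 = some a :=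
    PySem.List.pyGet?_ofNat (a :: b :: c :: r) 0 (by simp)
  have g1 : PySem.List.pyGet? (a :: b :: c :: r) 1 = some b := by
    simpa using PySem.List.pyGet?_ofNat (a :: b :: c :: r) 1 (by simp)
  have g2 : PySem.List.pyGet? (a :: b :: c :: r) 2 = some c := by
    simpa using PySem.List.pyGet?_ofNat (a :: b :: c :: r) 2 (by simp)
  simp [bTri, h3, bStep, g0, g1, g2, triE]

theorem bFold_eq (mesh : List (List Int)) (hpre : Pre_IsMeshTriangulated mesh) :
    ∀ es, mesh.foldl bTri (some es) = some (es ++ flatE mesh) := by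
  induction mesh with
  | nil => intro es; simp [flatE]
  | cons tri rest ih =>
    intro es
    have htri := hpre tri (by simp)
    match tri, htri with
    | a :: b :: c :: r, _ =>
      have hrest : Pre_IsMeshTriangulated rest := fun t ht => hpre t (by simp [ht])
      rw [List.foldl_cons, bTri_cons, ih hrest]
      simp [flatE, triE]

-- the strict lexicographic comparison Python's tuple sort uses (sorted2's 'before' for fst/snd keys)
def lexLt (a b : Int × Int) : Bool :=
  decide (a.1 < b.1) || (!decide (b.1 < a.1) && decide (a.2 < b.2))

theorem lexLt_iff (a b : Int × Int) :
    lexLt a b = true ↔ a.1 < b.1 ∨ (¬ b.1 < a.1 ∧ a.2 < b.2) := by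
  simp [lexLt]

theorem lexLt_trans (a b c : Int × Int) (h1 : lexLt a b = true) (h2 : lexLt b c = true) :
    lexLt a c = true := by
  rw [lexLt_iff] at *; omega

theorem lexLt_asym (a b : Int × Int) (h : lexLt a b = true) : lexLt b a = false := by
  cases hba : lexLt b a with
  | false => rfl
  | true => rw [lexLt_iff] at h hba; omega

theorem lexLt_total (a b : Int × Int) (h1 : lexLt a b = false) (h2 : lexLt b a = false) :
    a = b := by
  have h1' : ¬ lexLt a b = true := by simp [h1]
  have h2' : ¬ lexLt b a = true := by simp [h2]
  rw [lexLt_iff] at h1' h2'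
  obtain ⟨a1, a2⟩ := a; obtain ⟨b1, b2⟩ := b
  simp only [Prod.mk.injEq]
  constructor <;> omega

-- insertion preserves sortedness for a strict order
theorem pairwise_insertBy (before : (Int × Int) → (Int × Int) → Bool)
    (htrans : ∀ a b c, before a b = true → before b c = true → before a c = true)
    (hasym : ∀ a b, before a b = true → before b a = false)
    (x : Int × Int) (ys : List (Int × Int))
    (h : ys.Pairwise (fun a b => before b a = false)) :
    (PySem.List.insertBy before x ys).Pairwise (fun a b => before b a = false) := by
  induction ys with
  | nil => simp [PySem.List.insertBy]
  | cons y ys ih =>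
    rw [List.pairwise_cons] at h
    obtain ⟨hy, hys⟩ := h
    by_cases hb : before x y = true
    · rw [show PySem.List.insertBy before x (y :: ys) = x :: y :: ys by
        simp [PySem.List.insertBy, hb]]
      refine List.Pairwise.cons ?_ (List.Pairwise.cons hy hys)
      intro z hz
      rcases List.mem_cons.mp hz with rfl | hz
      · exact hasym _ _ hb
      · cases hzx : before z x with
        | false => rfl
        | true =>
          have := htrans z x y hzx hb
          rw [hy z hz] at this; exact absurd this (by simp)
    · have hb' : before x y = false := by cases h : before x y with
        | false => rfl
        | true => exact absurd h hb
      rw [show PySem.List.insertBy before x (y :: ys) = y :: PySem.List.insertBy before x ys by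
        simp [PySem.List.insertBy, hb']]
      refine List.Pairwise.cons ?_ (ih hys)
      intro z hz
      rcases (PySem.List.mem_insertBy before x z ys).mp hz with rfl | hz
      · exact hb'
      · exact hy z hz

theorem pairwise_foldl_insertBy (before : (Int × Int) → (Int × Int) → Bool)
    (htrans : ∀ a b c, before a b = true → before b c = true → before a c = true)
    (hasym : ∀ a b, before a b = true → before b a = false)
    (es : List (Int × Int)) :
    ∀ acc, acc.Pairwise (fun a b => before b a = false) →
      (es.foldl (fun acc x => PySem.List.insertBy before x acc) acc).Pairwise
        (fun a b => before b a = false) := by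
  induction es with
  | nil => intro acc h; exact h
  | cons e r ih =>
    intro acc h
    exact ih _ (pairwise_insertBy before htrans hasym e acc h)

-- sorted2 with the fst/snd keys is insertion sort by lexLt (definitional)
theorem sorted2_eq_foldl (raw : List (Int × Int)) :
    PySem.List.sorted2 raw Prod.fst Prod.snd =
      raw.foldl (fun acc x => PySem.List.insertBy lexLt x acc) [] := rfl

theorem sorted2_pairwise_le (raw : List (Int × Int)) :
    (PySem.List.sorted2 raw Prod.fst Prod.snd).Pairwise (fun a b => lexLt b a = false) := by
  rw [sorted2_eq_foldl]
  exact pairwise_foldl_insertBy lexLt lexLt_trans lexLt_asym raw [] (by simp)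

-- the adjacent-pair all() over zip(edges, edges[1:]) is Chain' (≠)
theorem adjAll_iff_chain' (s : List (Int × Int)) :
    ((s.zip (PySem.List.slice s (some 1) none)).all (fun p => !(p.1 == p.2))) = true ↔
      s.IsChain (fun a b => a ≠ b) := by
  rw [PySem.List.slice_from_one]
  induction s with
  | nil => simp
  | cons a t ih =>
    cases t with
    | nil => simp
    | cons b r =>
      rw [List.isChain_cons_cons]
      simp only [List.tail_cons, List.zip_cons_cons, List.all_cons, Bool.and_eq_true,
        ← ih]
      simp

-- two chains combine pointwise
theorem isChain_and {α : Type} (R S : α → α → Prop) (l : List α)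
    (hR : l.IsChain R) (hS : l.IsChain S) : l.IsChain (fun a b => R a b ∧ S a b) := by
  induction l with
  | nil => exact List.isChain_nil
  | cons a t ih =>
    cases t with
    | nil => exact List.isChain_singleton a
    | cons b r =>
      rw [List.isChain_cons_cons] at hR hS ⊢
      exact ⟨⟨hR.1, hS.1⟩, ih hR.2 hS.2⟩

-- on a lex-sorted list, adjacent-distinct decides Nodup
theorem adjAll_sorted_iff_nodup (raw : List (Int × Int)) :
    ((PySem.List.sorted2 raw Prod.fst Prod.snd).zip
        (PySem.List.slice (PySem.List.sorted2 raw Prod.fst Prod.snd) (some 1) none)).all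
      (fun p => !(p.1 == p.2)) = true ↔ raw.Nodup := by
  rw [adjAll_iff_chain']

  have hperm := PySem.List.sorted2_perm raw Prod.fst Prod.snd false
  have hpw := sorted2_pairwise_le raw
  constructor
  · intro hch
    -- adjacent distinct + adjacent lex-≤ gives adjacent strict lex-<, hence Pairwise <, hence Nodup
    have hchain_le := hpw.isChain
    have hlt : (PySem.List.sorted2 raw Prod.fst Prod.snd).IsChain (fun a b => lexLt a b = true) := by
      refine (isChain_and _ _ _ hchain_le hch).imp ?_
      rintro a b ⟨hle, hne⟩
      cases h : lexLt a b with
      | true => rfl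
      | false => exact absurd (lexLt_total a b h hle) hne
    haveI : Trans (fun (a b : Int × Int) => lexLt a b = true)
        (fun (a b : Int × Int) => lexLt a b = true)
        (fun (a b : Int × Int) => lexLt a b = true) :=
      ⟨fun h1 h2 => lexLt_trans _ _ _ h1 h2⟩
    have hpwlt : (PySem.List.sorted2 raw Prod.fst Prod.snd).Pairwise
        (fun a b => lexLt a b = true) := List.isChain_iff_pairwise.mp hlt
    have hnd : (PySem.List.sorted2 raw Prod.fst Prod.snd).Nodup := by
      refine hpwlt.imp ?_
      intro a b hab heq; subst heq
      rw [lexLt_asym a a hab] at hab; exact absurd hab (by simp)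
    exact hperm.nodup_iff.mp hnd
  · intro hnd
    have : (PySem.List.sorted2 raw Prod.fst Prod.snd).Nodup := hperm.nodup_iff.mpr hnd
    exact this.isChain

-- ===== VERDICT (by name: the statement is the Claim_ definition above) =====
theorem IsMeshTriangulated_spec : Claim_equal_IsMeshTriangulated := by
  intro mesh _ hpre
  unfold Spec_IsMeshTriangulated IsMeshTriangulated IsMeshTriangulated_alt bGen
  rw [aFold_eq mesh hpre, bFold_eq mesh hpre []]
  simp only [List.nil_append]
  have hrep : ERep PySem.Dict.empty [] := by
    intro a b
    simp [PySem.Dict.get?_empty]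
  rcases eFold_spec (flatE mesh) PySem.Dict.empty [] hrep List.nodup_nil with
    ⟨herr, hnd⟩ | ⟨d', hok, hnd, _⟩
  · rw [herr]
    simp only [List.nil_append] at hnd
    have : ((PySem.List.sorted2 (flatE mesh) Prod.fst Prod.snd).zip
        (PySem.List.slice (PySem.List.sorted2 (flatE mesh) Prod.fst Prod.snd) (some 1) none)).all
      (fun p => !(p.1 == p.2)) = false := by
      cases h : ((PySem.List.sorted2 (flatE mesh) Prod.fst Prod.snd).zip
          (PySem.List.slice (PySem.List.sorted2 (flatE mesh) Prod.fst Prod.snd) (some 1) none)).all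
        (fun p => !(p.1 == p.2)) with
      | false => rfl
      | true => exact absurd ((adjAll_sorted_iff_nodup _).mp h) hnd
    simp [this]
  · rw [hok]
    simp only [List.nil_append] at hnd
    have := (adjAll_sorted_iff_nodup (flatE mesh)).mpr hnd
    simp [this]
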